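-- pv_equiv track=rewrite | github.com/DaMinaup6/algorithm-exercises | leetcode/medium/1860_incremental_memory_leak.py | memLeak
-- ===== SOURCE A (Python) =====
-- from typing import List
--
-- def memLeak(memory1: int, memory2: int) -> List[int]:
--     memories = {1: memory1, 2: memory2}
--
--     curr_second = 1
--     while curr_second <= memories[1] or curr_second <= memories[2]:
--         memory_diff  = abs(memories[1] - memories[2])
--         larger_index = 1 if memories[1] >= memories[2] else 2
--
--         if curr_second >= memory_diff:
--             memories[larger_index] -= curr_second
--             curr_second += 1
--         else:
--             # e.g. memory1 == 19, memory2 == 97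
--             # use binary search to find out that we allocate memories to memory stick 2 from 1st second to 13th second since (1 + 13) * 13 // 2 == 91
--             # then after that we set memory2 to 6 and curr_second to 14
--             left_pointer, right_pointer = curr_second, memories[larger_index]
--             while left_pointer <= right_pointer:
--                 middle_pointer = (left_pointer + right_pointer) // 2
--                 middle_sum = (middle_pointer + curr_second) * (middle_pointer - curr_second + 1) // 2
--                 if middle_sum > memory_diff:
--                     right_pointer = middle_pointer - 1
--                 else:
--                     left_pointer = middle_pointer + 1
--             memories[larger_index] -= (right_pointer + curr_second) * (right_pointer - curr_second + 1) // 2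
--             curr_second = right_pointer + 1
--
--     return [curr_second, memories[1], memories[2]]
-- ===== SOURCE B (Python) =====
-- from typing import List
--
-- def memLeak(memory1: int, memory2: int) -> List[int]:
--     # Keep the sticks as an ordered pair (hi, lo) where hi is the stick the next
--     # allocation goes to; sw records whether hi is stick 2 (ties go to stick 1).
--     if memory1 >= memory2:
--         hi, lo, sw = memory1, memory2, False
--     else:
--         hi, lo, sw = memory2, memory1, True
--     t = 1
--     while t <= hi:
--         hi -= t
--         if hi < lo or (hi == lo and sw):
--             hi, lo, sw = lo, hi, not sw
--         t += 1
--     return [t, lo, hi] if sw else [t, hi, lo]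
-- ===== Notes on version B (the rewrite author's own statement) =====
-- stated objective: alternative
-- what changed: Replaced A's dict-of-two-sticks plus binary-search skip-ahead (which collapses runs of allocations to the same stick) by a one-second-at-a-time simulation over a normalized state (hi, lo, swapped): subtract t from hi, re-order the pair when the other stick becomes the allocation target, and undo the swap at the end; trades A's log-time skip for a much shorter loop.
-- outside the precondition, e.g. on memLeak(5, -1): A returns [4, -1, -1], B returns [3, 2, -1]; on memLeak(100, -5): A returns [15, -5, -5], B returns [14, 9, -5]
import Mathlib
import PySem

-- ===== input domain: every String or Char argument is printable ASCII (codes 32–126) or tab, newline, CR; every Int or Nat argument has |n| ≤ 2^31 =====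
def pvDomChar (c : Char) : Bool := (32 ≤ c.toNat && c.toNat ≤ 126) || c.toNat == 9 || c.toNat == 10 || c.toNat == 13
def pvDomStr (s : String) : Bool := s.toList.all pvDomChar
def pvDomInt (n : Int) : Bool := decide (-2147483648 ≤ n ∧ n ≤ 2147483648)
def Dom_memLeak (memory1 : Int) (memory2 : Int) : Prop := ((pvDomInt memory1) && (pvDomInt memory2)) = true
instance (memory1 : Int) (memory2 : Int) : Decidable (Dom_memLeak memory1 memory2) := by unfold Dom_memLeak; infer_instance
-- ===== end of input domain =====

-- B replaces A's dict-of-two-sticks plus binary-search skip-ahead by a second-by-second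
-- simulation over a normalized (hi, lo, swapped) state (alternative; not faster).

-- ===== PORT A =====
-- Python's gauss expression '(r + t) * (r - t + 1) // 2', used twice in A (exact: // is PySem floor division).
def pySum (t r : Int) : Int := PySem.Int.floordiv ((r + t) * (r - t + 1)) 2

-- small toNat bridges cited by the termination lemmas
theorem pvToNatLt (a b : Int) (h1 : a < b) (h2 : 0 < b) : a.toNat < b.toNat :=
  (Int.toNat_lt_toNat h2).mpr h1
theorem pvToNatZero (a : Int) (h : a ≤ 0) : a.toNat = 0 := Int.toNat_of_nonpos h

theorem pySum_self (t : Int) : pySum t t = t := by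
  unfold pySum
  rw [sub_self, zero_add, mul_one, ← two_mul,
    PySem.Int.floordiv_eq_ediv_of_pos two_pos, Int.mul_ediv_cancel_left _ two_ne_zero]

theorem pySum_nonneg (t r : Int) (h1 : 0 ≤ r + t) (h2 : 0 ≤ r - t + 1) : 0 ≤ pySum t r := by
  unfold pySum
  rw [PySem.Int.floordiv_eq_ediv_of_pos two_pos]
  exact Int.ediv_nonneg (mul_nonneg h1 h2) (le_of_lt two_pos)

-- termination facts for the ports (cited by name in decreasing_by so the definitions stay small)
theorem decBS1 (l r : Int) (h : l ≤ r) :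
    (PySem.Int.floordiv (l + r) 2 - 1 - l + 1).toNat < (r - l + 1).toNat := by
  have hb := PySem.Int.floordiv_two_mid_bounds h
  generalize hg : PySem.Int.floordiv (l + r) 2 = m at hb ⊢
  exact pvToNatLt _ _ (by omega) (by omega)

theorem decBS2 (l r : Int) (h : l ≤ r) :
    (r - (PySem.Int.floordiv (l + r) 2 + 1) + 1).toNat < (r - l + 1).toNat := by
  have hb := PySem.Int.floordiv_two_mid_bounds h
  generalize hg : PySem.Int.floordiv (l + r) 2 = m at hb ⊢
  exact pvToNatLt _ _ (by omega) (by omega)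

-- A's inner binary-search loop, returning the final right_pointer.
def memLeakBSearch (currSecond memoryDiff leftP rightP : Int) : Int :=
  if leftP ≤ rightP then
    if pySum currSecond (PySem.Int.floordiv (leftP + rightP) 2) > memoryDiff then
      memLeakBSearch currSecond memoryDiff leftP (PySem.Int.floordiv (leftP + rightP) 2 - 1)
    else
      memLeakBSearch currSecond memoryDiff (PySem.Int.floordiv (leftP + rightP) 2 + 1) rightP
  else rightP
termination_by (rightP - leftP + 1).toNat
decreasing_by
  · exact decBS1 leftP rightP ‹_›
  · exact decBS2 leftP rightP ‹_›

-- needed for the outer loop's termination: the search result never drops below currSecond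
theorem memLeakBSearch_ge (t d : Int) : ∀ n : Nat, ∀ l r : Int, (r - l + 1).toNat = n →
    t ≤ l → t ≤ r → t < d → t ≤ memLeakBSearch t d l r := by
  intro n
  induction n using Nat.strong_induction_on with
  | _ n ih =>
    intro l r hn hl hr hd
    subst hn
    rw [memLeakBSearch]
    by_cases hlr : l ≤ r
    · simp only [if_pos hlr]
      have hb := PySem.Int.floordiv_two_mid_bounds hlr
      set m := PySem.Int.floordiv (l + r) 2 with hm
      by_cases hs : pySum t m > d
      · simp only [if_pos hs]
        have hmt : t + 1 ≤ m := by
          by_cases h : t < m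
          · exact h
          · exfalso
            have hme : m = t := le_antisymm (not_lt.mp h) (le_trans hl hb.1)
            rw [hme, pySum_self] at hs
            exact absurd hd (not_lt.mpr (le_of_lt hs))
        refine ih (m - 1 - l + 1).toNat ?_ l (m - 1) rfl hl (by omega) hd
        have hb2 := hb.2
        exact pvToNatLt _ _ (by omega) (by omega)
      · simp only [if_neg hs]
        refine ih (r - (m + 1) + 1).toNat ?_ (m + 1) r rfl (le_trans hl (by omega)) hr hd
        have hb1 := hb.1
        exact pvToNatLt _ _ (by omega) (by omega)
    · simp only [if_neg hlr]
      exact hr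

-- generic lexicographic decrease for one loop step: t strictly increases, and once t ≥ 1 the slack max − t shrinks
theorem pvLexStep (t t' M M' : Int) (ht' : t + 1 ≤ t') (hM : t ≤ M) (hlt : 1 ≤ t → M' - t' < M - t) :
    Prod.Lex (· < ·) (· < ·) ((1 - t').toNat, (M' - t' + 1).toNat)
      ((1 - t).toNat, (M - t + 1).toNat) := by
  by_cases h : t ≤ 0
  · exact Prod.Lex.left _ _ (pvToNatLt _ _ (by omega) (by omega))
  · have h1 : 1 ≤ t := by omega
    have hlt' := hlt h1
    have e1 : (1 - t').toNat = 0 := pvToNatZero _ (by omega)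
    have e2 : (1 - t).toNat = 0 := pvToNatZero _ (by omega)
    rw [e1, ← e2]
    exact Prod.Lex.right _ (pvToNatLt _ _ (by omega) (by omega))

theorem decStep1 (t m1 m2 : Int) (hcond : t ≤ m1 ∨ t ≤ m2) (hge : m1 ≥ m2) :
    Prod.Lex (· < ·) (· < ·) ((1 - (t + 1)).toNat, (max (m1 - t) m2 - (t + 1) + 1).toNat)
      ((1 - t).toNat, (max m1 m2 - t + 1).toNat) := by
  have hm1 : t ≤ m1 := hcond.elim id (fun h => le_trans h hge)
  have hMeq : max m1 m2 = m1 := max_eq_left hge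
  refine pvLexStep t (t + 1) (max m1 m2) (max (m1 - t) m2) (le_refl _) (le_trans hm1 (le_max_left m1 m2)) ?_
  intro h1
  have h2 : max (m1 - t) m2 ≤ m1 := max_le (by omega) hge
  rw [hMeq]
  generalize hg : max (m1 - t) m2 = Mx at h2 ⊢
  omega

theorem decStep2 (t m1 m2 : Int) (hcond : t ≤ m1 ∨ t ≤ m2) (hge : ¬ m1 ≥ m2) :
    Prod.Lex (· < ·) (· < ·) ((1 - (t + 1)).toNat, (max m1 (m2 - t) - (t + 1) + 1).toNat)
      ((1 - t).toNat, (max m1 m2 - t + 1).toNat) := by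
  have hltm : m1 ≤ m2 := le_of_lt (lt_of_not_ge hge)
  have hm2 : t ≤ m2 := hcond.elim (fun h => le_trans h hltm) id
  have hMeq : max m1 m2 = m2 := max_eq_right hltm
  refine pvLexStep t (t + 1) (max m1 m2) (max m1 (m2 - t)) (le_refl _) (le_trans hm2 (le_max_right m1 m2)) ?_
  intro h1
  have h2 : max m1 (m2 - t) ≤ m2 := max_le hltm (by omega)
  rw [hMeq]
  generalize hg : max m1 (m2 - t) = Mx at h2 ⊢
  omega

theorem decJump1 (t m1 m2 : Int) (hcond : t ≤ m1 ∨ t ≤ m2) (habs : ¬ t ≥ |m1 - m2|) (hge : m1 ≥ m2) :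
    Prod.Lex (· < ·) (· < ·)
      ((1 - (memLeakBSearch t (|m1 - m2|) t m1 + 1)).toNat,
       (max (m1 - pySum t (memLeakBSearch t (|m1 - m2|) t m1)) m2
          - (memLeakBSearch t (|m1 - m2|) t m1 + 1) + 1).toNat)
      ((1 - t).toNat, (max m1 m2 - t + 1).toNat) := by
  have hm1 : t ≤ m1 := hcond.elim id (fun h => le_trans h hge)
  have hd : t < |m1 - m2| := lt_of_not_ge habs
  have hr := memLeakBSearch_ge t (|m1 - m2|) (m1 - t + 1).toNat t m1 rfl le_rfl hm1 hd
  have hMeq : max m1 m2 = m1 := max_eq_left hge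
  generalize hR : memLeakBSearch t (|m1 - m2|) t m1 = R at hr ⊢
  have hS : 0 ≤ pySum t R ∨ t ≤ 0 := by
    by_cases h0 : t ≤ 0
    · exact Or.inr h0
    · exact Or.inl (pySum_nonneg t R (by omega) (by omega))
  generalize hSg : pySum t R = S at hS ⊢
  refine pvLexStep t (R + 1) (max m1 m2) (max (m1 - S) m2) (by omega) (le_trans hm1 (le_max_left m1 m2)) ?_
  intro h1
  have h2 : max (m1 - S) m2 ≤ m1 := max_le (by omega) hge
  rw [hMeq]
  generalize hg : max (m1 - S) m2 = Mx at h2 ⊢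
  omega

theorem decJump2 (t m1 m2 : Int) (hcond : t ≤ m1 ∨ t ≤ m2) (habs : ¬ t ≥ |m1 - m2|) (hge : ¬ m1 ≥ m2) :
    Prod.Lex (· < ·) (· < ·)
      ((1 - (memLeakBSearch t (|m1 - m2|) t m2 + 1)).toNat,
       (max m1 (m2 - pySum t (memLeakBSearch t (|m1 - m2|) t m2))
          - (memLeakBSearch t (|m1 - m2|) t m2 + 1) + 1).toNat)
      ((1 - t).toNat, (max m1 m2 - t + 1).toNat) := by
  have hltm : m1 ≤ m2 := le_of_lt (lt_of_not_ge hge)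
  have hm2 : t ≤ m2 := hcond.elim (fun h => le_trans h hltm) id
  have hd : t < |m1 - m2| := lt_of_not_ge habs
  have hr := memLeakBSearch_ge t (|m1 - m2|) (m2 - t + 1).toNat t m2 rfl le_rfl hm2 hd
  have hMeq : max m1 m2 = m2 := max_eq_right hltm
  generalize hR : memLeakBSearch t (|m1 - m2|) t m2 = R at hr ⊢
  have hS : 0 ≤ pySum t R ∨ t ≤ 0 := by
    by_cases h0 : t ≤ 0
    · exact Or.inr h0
    · exact Or.inl (pySum_nonneg t R (by omega) (by omega))
  generalize hSg : pySum t R = S at hS ⊢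
  refine pvLexStep t (R + 1) (max m1 m2) (max m1 (m2 - S)) (by omega) (le_trans hm2 (le_max_right m1 m2)) ?_
  intro h1
  have h2 : max m1 (m2 - S) ≤ m2 := max_le hltm (by omega)
  rw [hMeq]
  generalize hg : max m1 (m2 - S) = Mx at h2 ⊢
  omega

def memLeakLoop (currSecond m1 m2 : Int) : List Int :=
  if currSecond ≤ m1 ∨ currSecond ≤ m2 then
    if currSecond ≥ |m1 - m2| then
      if m1 ≥ m2 then memLeakLoop (currSecond + 1) (m1 - currSecond) m2
      else memLeakLoop (currSecond + 1) m1 (m2 - currSecond)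
    else
      if m1 ≥ m2 then
        memLeakLoop (memLeakBSearch currSecond (|m1 - m2|) currSecond m1 + 1)
          (m1 - pySum currSecond (memLeakBSearch currSecond (|m1 - m2|) currSecond m1)) m2
      else
        memLeakLoop (memLeakBSearch currSecond (|m1 - m2|) currSecond m2 + 1)
          m1 (m2 - pySum currSecond (memLeakBSearch currSecond (|m1 - m2|) currSecond m2))
  else [currSecond, m1, m2]
termination_by ((1 - currSecond).toNat, (max m1 m2 - currSecond + 1).toNat)
decreasing_by
  · exact decStep1 currSecond m1 m2 ‹_› ‹_›
  · exact decStep2 currSecond m1 m2 ‹_› ‹_›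
  · exact decJump1 currSecond m1 m2 ‹_› ‹_› ‹_›
  · exact decJump2 currSecond m1 m2 ‹_› ‹_› ‹_›

def memLeak (memory1 : Int) (memory2 : Int) : List Int := memLeakLoop 1 memory1 memory2

-- ===== PORT B =====
-- termination of B's normalized loop: t increases, and the larger of the new pair never exceeds max hi lo
theorem decAlt (t hi lo a b : Int) (h : t ≤ hi) (ha : 1 ≤ t → a ≤ max hi lo) (hb : 1 ≤ t → b ≤ max hi lo) :
    Prod.Lex (· < ·) (· < ·) ((1 - (t + 1)).toNat, (max a b - (t + 1) + 1).toNat)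
      ((1 - t).toNat, (max hi lo - t + 1).toNat) := by
  refine pvLexStep t (t + 1) (max hi lo) (max a b) (le_refl _) (le_trans h (le_max_left _ _)) ?_
  intro h1
  have h2 : max a b ≤ max hi lo := max_le (ha h1) (hb h1)
  generalize hA : max a b = A at h2 ⊢
  generalize hB : max hi lo = B at h2 ⊢
  omega

-- B's while loop on the normalized state: hi is the stick the next second goes to,
-- sw = true means hi is stick 2 of the original pair.
def memLeakAltGo (t hi lo : Int) (sw : Bool) : List Int :=
  if h : t ≤ hi then
    if hi - t < lo ∨ (hi - t = lo ∧ sw = true) then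
      memLeakAltGo (t + 1) lo (hi - t) (!sw)
    else
      memLeakAltGo (t + 1) (hi - t) lo sw
  else if sw then [t, lo, hi] else [t, hi, lo]
termination_by ((1 - t).toNat, (max hi lo - t + 1).toNat)
decreasing_by
  · exact decAlt t hi lo lo (hi - t) h (fun _ => le_max_right _ _)
      (fun h1 => le_trans (by omega) (le_max_left hi lo))
  · exact decAlt t hi lo (hi - t) lo h
      (fun h1 => le_trans (by omega) (le_max_left hi lo)) (fun _ => le_max_right _ _)

def memLeak_alt (memory1 : Int) (memory2 : Int) : List Int :=
  if memory1 ≥ memory2 then memLeakAltGo 1 memory1 memory2 false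
  else memLeakAltGo 1 memory2 memory1 true

-- ===== PRECONDITION & SPEC =====
-- Pre_ restricts to the problem's natural domain: memory sizes are nonnegative (plus the
-- trivially-terminating all-nonpositive inputs); on mixed-sign inputs A's binary-search jump
-- is bounded by diff = |m1 - m2|, which exceeds the available memory, and overdraws the
-- positive stick, a value outside the problem's intent.
def Pre_memLeak (memory1 : Int) (memory2 : Int) : Prop :=
  (0 ≤ memory1 ∧ 0 ≤ memory2) ∨ (memory1 ≤ 0 ∧ memory2 ≤ 0)
instance (memory1 : Int) (memory2 : Int) : Decidable (Pre_memLeak memory1 memory2) := by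
  unfold Pre_memLeak; infer_instance
def pvWitness_memLeak : Int × Int := (19, 97)

def Spec_memLeak (memory1 : Int) (memory2 : Int) (out : List Int) : Prop := out = memLeak_alt memory1 memory2
instance (memory1 : Int) (memory2 : Int) (out : List Int) : Decidable (Spec_memLeak memory1 memory2 out) := by unfold Spec_memLeak; infer_instance

-- ===== CLAIM (what is proved, stated in full; the proofs are below) =====
def Claim_equal_memLeak : Prop := ∀ (memory1 : Int) (memory2 : Int), Dom_memLeak memory1 memory2 → Pre_memLeak memory1 memory2 → Spec_memLeak memory1 memory2 (memLeak memory1 memory2)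

-- ===== LEMMAS AND PROOFS =====

-- proof-only reference loop: the plain one-second-a-time simulation on the unordered pair;
-- A's loop collapses to it (jump lemmas below), and B's normalized loop is shown equal to it.
def simLoop (t m1 m2 : Int) : List Int :=
  if t ≤ m1 ∨ t ≤ m2 then
    if m1 ≥ m2 then simLoop (t + 1) (m1 - t) m2
    else simLoop (t + 1) m1 (m2 - t)
  else [t, m1, m2]
termination_by ((1 - t).toNat, (max m1 m2 - t + 1).toNat)
decreasing_by
  · exact decStep1 t m1 m2 ‹_› ‹_›
  · exact decStep2 t m1 m2 ‹_› ‹_›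

theorem pySum_double (t r : Int) : 2 * pySum t r = (r + t) * (r - t + 1) := by
  unfold pySum
  rw [PySem.Int.floordiv_eq_ediv_of_pos (by norm_num)]
  rcases Int.even_or_odd (r + t) with ⟨k, hk⟩ | ⟨k, hk⟩
  · have hk2 : r + t = 2 * k := by omega
    rw [hk2, mul_assoc, Int.mul_ediv_cancel_left _ (by norm_num)]
  · have hk2 : r - t + 1 = 2 * (r - k) := by omega
    rw [hk2, mul_comm (r + t), mul_assoc, Int.mul_ediv_cancel_left _ (by norm_num)]

theorem pySum_ge_left (t r : Int) (ht : 1 ≤ t) (htr : t ≤ r) : t ≤ pySum t r := by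
  have h := pySum_double t r
  have key : (r + t) * (r - t + 1) - 2 * t = (r - t) * (r + t + 1) := by ring
  have pos : 0 ≤ (r - t) * (r + t + 1) := mul_nonneg (by omega) (by omega)
  generalize hA : (r + t) * (r - t + 1) = A at h key
  generalize hB : (r - t) * (r + t + 1) = B at key pos
  omega

theorem pySum_succ_left (t r : Int) : pySum t r = t + pySum (t + 1) r := by
  have h1 := pySum_double t r
  have h2 := pySum_double (t + 1) r
  have h3 : (r + t) * (r - t + 1) = (r + (t + 1)) * (r - (t + 1) + 1) + 2 * t := by ring
  generalize hA : (r + t) * (r - t + 1) = A at h1 h3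
  generalize hB : (r + (t + 1)) * (r - (t + 1) + 1) = B at h2 h3
  omega

-- the binary search's result r satisfies sum(t..r) ≤ d (invariant: l = t or sum(t..l-1) ≤ d)
theorem memLeakBSearch_sum (t d : Int) : ∀ n : Nat, ∀ l r : Int, (r - l + 1).toNat = n →
    t ≤ l → t ≤ r → l ≤ r + 1 → t < d → (l = t ∨ pySum t (l - 1) ≤ d) →
    pySum t (memLeakBSearch t d l r) ≤ d := by
  intro n
  induction n using Nat.strong_induction_on with
  | _ n ih =>
    intro l r hn hl hr hlr1 hd hinv
    rw [memLeakBSearch]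
    by_cases hlr : l ≤ r
    · simp only [if_pos hlr]
      have hb := PySem.Int.floordiv_two_mid_bounds hlr
      set m := PySem.Int.floordiv (l + r) 2 with hm
      by_cases hs : pySum t m > d
      · simp only [if_pos hs]
        have hmt : t + 1 ≤ m := by
          by_cases h : t < m
          · omega
          · exfalso
            have hme : m = t := by omega
            rw [hme, pySum_self] at hs; omega
        exact ih (m - 1 - l + 1).toNat (by omega) l (m - 1) rfl hl (by omega) (by omega) hd hinv
      · simp only [if_neg hs]
        refine ih (r - (m + 1) + 1).toNat (by omega) (m + 1) r rfl (by omega) hr (by omega) hd ?_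
        right
        have : m + 1 - 1 = m := by ring
        rw [this]; omega
    · simp only [if_neg hlr]
      have hle : l = r + 1 := by omega
      rcases hinv with h | h
      · omega
      · have : l - 1 = r := by omega
        rw [this] at h; exact h

-- simLoop takes the (r - t + 1) consecutive single steps that A's jump collapses (stick 1 larger)
theorem simLoop_jump1 : ∀ n : Nat, ∀ t r m1 m2 : Int, (r - t).toNat = n →
    1 ≤ t → t ≤ r → pySum t r ≤ m1 - m2 → 0 ≤ m2 →
    simLoop t m1 m2 = simLoop (r + 1) (m1 - pySum t r) m2 := by
  intro n
  induction n using Nat.strong_induction_on with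
  | _ n ih =>
    intro t r m1 m2 hn ht htr hS hm2
    have hst : t ≤ pySum t r := pySum_ge_left t r ht htr
    have hm1 : t ≤ m1 := by omega
    have hge : m1 ≥ m2 := by omega
    rw [simLoop]
    simp only [if_pos (Or.inl hm1), if_pos hge]
    rcases eq_or_lt_of_le htr with he | hlt
    · subst he
      rw [pySum_self]
    · have hsucc := pySum_succ_left t r
      have := ih (r - (t + 1)).toNat (by omega) (t + 1) r (m1 - t) m2 rfl (by omega)
        (by omega) (by omega) hm2
      rw [this]
      have harg : m1 - t - pySum (t + 1) r = m1 - pySum t r := by omega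
      rw [harg]

-- symmetric jump for stick 2 (strictly larger: ties go to stick 1, but here m2 > m1 throughout)
theorem simLoop_jump2 : ∀ n : Nat, ∀ t r m1 m2 : Int, (r - t).toNat = n →
    1 ≤ t → t ≤ r → pySum t r ≤ m2 - m1 → 0 ≤ m1 →
    simLoop t m1 m2 = simLoop (r + 1) m1 (m2 - pySum t r) := by
  intro n
  induction n using Nat.strong_induction_on with
  | _ n ih =>
    intro t r m1 m2 hn ht htr hS hm1
    have hst : t ≤ pySum t r := pySum_ge_left t r ht htr
    have hm2 : t ≤ m2 := by omega
    have hlt' : ¬ (m1 ≥ m2) := by omega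
    rw [simLoop]
    simp only [if_pos (Or.inr hm2), if_neg hlt']
    rcases eq_or_lt_of_le htr with he | hlt
    · subst he
      rw [pySum_self]
    · have hsucc := pySum_succ_left t r
      have := ih (r - (t + 1)).toNat (by omega) (t + 1) r m1 (m2 - t) rfl (by omega)
        (by omega) (by omega) hm1
      rw [this]
      have harg : m2 - t - pySum (t + 1) r = m2 - pySum t r := by omega
      rw [harg]

-- A's loop equals simLoop on reachable states: t ≥ 1 and both memories nonnegative
theorem loop_eq : ∀ n : Nat, ∀ t m1 m2 : Int, (max m1 m2 + 1 - t).toNat = n →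
    1 ≤ t → 0 ≤ m1 → 0 ≤ m2 → memLeakLoop t m1 m2 = simLoop t m1 m2 := by
  intro n
  induction n using Nat.strong_induction_on with
  | _ n ih =>
    intro t m1 m2 hn ht hm1 hm2
    by_cases hcond : t ≤ m1 ∨ t ≤ m2
    · by_cases habs : t ≥ |m1 - m2|
      · -- single-step branch of A; identical step in simLoop
        rw [memLeakLoop, simLoop]
        simp only [if_pos hcond, if_pos habs]
        by_cases hge : m1 ≥ m2
        · simp only [if_pos hge]
          have habs' : |m1 - m2| = m1 - m2 := abs_of_nonneg (by omega)
          have htm1 : t ≤ m1 := by omega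
          exact ih (max (m1 - t) m2 + 1 - (t + 1)).toNat (by omega) (t + 1) (m1 - t) m2
            rfl (by omega) (by omega) hm2
        · simp only [if_neg hge]
          have habs' : |m1 - m2| = m2 - m1 := by rw [abs_sub_comm]; exact abs_of_nonneg (by omega)
          have htm2 : t ≤ m2 := by omega
          exact ih (max m1 (m2 - t) + 1 - (t + 1)).toNat (by omega) (t + 1) m1 (m2 - t)
            rfl (by omega) hm1 (by omega)
      · by_cases hge : m1 ≥ m2
        · have habs' : |m1 - m2| = m1 - m2 := abs_of_nonneg (by omega)
          have hd : t < m1 - m2 := by omega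
          have htm1 : t ≤ m1 := by omega
          have hr := memLeakBSearch_ge t (|m1 - m2|) (m1 - t + 1).toNat t m1 rfl le_rfl htm1 (by omega)
          have hSle := memLeakBSearch_sum t (|m1 - m2|) (m1 - t + 1).toNat t m1 rfl le_rfl htm1
            (by omega) (by omega) (Or.inl rfl)
          set r := memLeakBSearch t (|m1 - m2|) t m1 with hrdef
          have hSle' : pySum t r ≤ m1 - m2 := by omega
          have hSge : t ≤ pySum t r := pySum_ge_left t r ht hr
          rw [memLeakLoop]
          simp only [if_pos hcond, if_neg habs, if_pos hge, ← hrdef]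
          rw [ih (max (m1 - pySum t r) m2 + 1 - (r + 1)).toNat (by omega) (r + 1)
            (m1 - pySum t r) m2 rfl (by omega) (by omega) hm2]
          exact (simLoop_jump1 (r - t).toNat t r m1 m2 rfl ht hr hSle' hm2).symm
        · have habs' : |m1 - m2| = m2 - m1 := by rw [abs_sub_comm]; exact abs_of_nonneg (by omega)
          have hd : t < m2 - m1 := by omega
          have htm2 : t ≤ m2 := by omega
          have hr := memLeakBSearch_ge t (|m1 - m2|) (m2 - t + 1).toNat t m2 rfl le_rfl htm2 (by omega)
          have hSle := memLeakBSearch_sum t (|m1 - m2|) (m2 - t + 1).toNat t m2 rfl le_rfl htm2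
            (by omega) (by omega) (Or.inl rfl)
          set r := memLeakBSearch t (|m1 - m2|) t m2 with hrdef
          have hSle' : pySum t r ≤ m2 - m1 := by omega
          have hSge : t ≤ pySum t r := pySum_ge_left t r ht hr
          rw [memLeakLoop]
          simp only [if_pos hcond, if_neg habs, if_neg hge, ← hrdef]
          rw [ih (max m1 (m2 - pySum t r) + 1 - (r + 1)).toNat (by omega) (r + 1)
            m1 (m2 - pySum t r) rfl (by omega) hm1 (by omega)]
          exact (simLoop_jump2 (r - t).toNat t r m1 m2 rfl ht hr hSle' hm1).symm
    · rw [memLeakLoop, simLoop]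
      simp only [if_neg hcond]

-- measure bookkeeping for altGo_eq
theorem altMeasure (t m1 m2 a b : Int) (ht : t ≤ max m1 m2) (hab : max a b ≤ max m1 m2) :
    (max a b + 1 - (t + 1)).toNat < (max m1 m2 + 1 - t).toNat := by
  generalize hA : max a b = A at hab
  generalize hB : max m1 m2 = B at hab ht
  exact pvToNatLt _ _ (by omega) (by omega)

-- B's normalized loop equals simLoop: sw = false carries (m1, m2) with m2 ≤ m1,
-- sw = true carries (m2, m1) with m1 < m2 (reachable-state invariant).
theorem altGo_eq : ∀ n : Nat, ∀ t m1 m2 : Int, (max m1 m2 + 1 - t).toNat = n →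
    1 ≤ t → 0 ≤ m1 → 0 ≤ m2 →
    (m2 ≤ m1 → memLeakAltGo t m1 m2 false = simLoop t m1 m2) ∧
    (m1 < m2 → memLeakAltGo t m2 m1 true = simLoop t m1 m2) := by
  intro n
  induction n using Nat.strong_induction_on with
  | _ n ih =>
    intro t m1 m2 hn ht hm1 hm2
    constructor
    · intro hge
      rw [memLeakAltGo, simLoop]
      by_cases hc : t ≤ m1
      · have hcond : t ≤ m1 ∨ t ≤ m2 := Or.inl hc
        simp only [dif_pos hc, if_pos hcond, if_pos (show m1 ≥ m2 from hge)]
        by_cases h2 : m1 - t < m2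
        · have hcc : m1 - t < m2 ∨ (m1 - t = m2 ∧ (false : Bool) = true) := Or.inl h2
          simp only [if_pos hcc, Bool.not_false]
          refine (ih (max (m1 - t) m2 + 1 - (t + 1)).toNat ?_ (t + 1) (m1 - t) m2 rfl
            (by omega) (by omega) hm2).2 h2
          rw [← hn]
          exact altMeasure t m1 m2 (m1 - t) m2 (le_trans hc (le_max_left _ _))
            (max_le (le_trans (by omega) (le_max_left _ _)) (le_max_right _ _))
        · have hcc : ¬ (m1 - t < m2 ∨ (m1 - t = m2 ∧ (false : Bool) = true)) := by
            intro hor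
            rcases hor with h | ⟨_, hf⟩
            · exact h2 h
            · exact Bool.false_ne_true hf
          simp only [if_neg hcc]
          refine (ih (max (m1 - t) m2 + 1 - (t + 1)).toNat ?_ (t + 1) (m1 - t) m2 rfl
            (by omega) (by omega) hm2).1 (by omega)
          rw [← hn]
          exact altMeasure t m1 m2 (m1 - t) m2 (le_trans hc (le_max_left _ _))
            (max_le (le_trans (by omega) (le_max_left _ _)) (le_max_right _ _))
      · have hcond : ¬ (t ≤ m1 ∨ t ≤ m2) := by omega
        simp only [dif_neg hc, if_neg hcond]
        simp
    · intro hlt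
      rw [memLeakAltGo, simLoop]
      by_cases hc : t ≤ m2
      · have hcond : t ≤ m1 ∨ t ≤ m2 := Or.inr hc
        have hnge : ¬ (m1 ≥ m2) := by omega
        simp only [dif_pos hc, if_pos hcond, if_neg hnge]
        by_cases h2 : m2 - t ≤ m1
        · have hcc : m2 - t < m1 ∨ (m2 - t = m1 ∧ True) := by
            rcases lt_or_eq_of_le h2 with h | h
            · exact Or.inl h
            · exact Or.inr ⟨h, trivial⟩
          simp only [if_pos hcc, Bool.not_true]
          refine (ih (max m1 (m2 - t) + 1 - (t + 1)).toNat ?_ (t + 1) m1 (m2 - t) rfl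
            (by omega) hm1 (by omega)).1 h2
          rw [← hn]
          exact altMeasure t m1 m2 m1 (m2 - t) (le_trans hc (le_max_right _ _))
            (max_le (le_max_left _ _) (le_trans (by omega) (le_max_right _ _)))
        · have hcc : ¬ (m2 - t < m1 ∨ (m2 - t = m1 ∧ True)) := by
            intro hor
            rcases hor with h | ⟨h, _⟩
            · omega
            · omega
          simp only [if_neg hcc]
          refine (ih (max m1 (m2 - t) + 1 - (t + 1)).toNat ?_ (t + 1) m1 (m2 - t) rfl
            (by omega) hm1 (by omega)).2 (by omega)
          rw [← hn]
          exact altMeasure t m1 m2 m1 (m2 - t) (le_trans hc (le_max_right _ _))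
            (max_le (le_max_left _ _) (le_trans (by omega) (le_max_right _ _)))
      · have hcond : ¬ (t ≤ m1 ∨ t ≤ m2) := by omega
        simp only [dif_neg hc, if_neg hcond]
        simp

-- ===== VERDICT (by name: the statement is the Claim_ definition above) =====
theorem memLeak_spec : Claim_equal_memLeak := by
  intro m1 m2 _ hpre
  unfold Spec_memLeak memLeak memLeak_alt
  rcases hpre with ⟨h1, h2⟩ | ⟨h1, h2⟩
  · have hsim : memLeakLoop 1 m1 m2 = simLoop 1 m1 m2 :=
      loop_eq (max m1 m2 + 1 - 1).toNat 1 m1 m2 rfl le_rfl h1 h2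
    by_cases hge : m1 ≥ m2
    · rw [hsim, if_pos hge]
      exact ((altGo_eq (max m1 m2 + 1 - 1).toNat 1 m1 m2 rfl le_rfl h1 h2).1 hge).symm
    · rw [hsim, if_neg hge]
      exact ((altGo_eq (max m1 m2 + 1 - 1).toNat 1 m1 m2 rfl le_rfl h1 h2).2 (by omega)).symm
  · have hc1 : ¬ ((1 : Int) ≤ m1 ∨ (1 : Int) ≤ m2) := by omega
    rw [memLeakLoop]
    simp only [if_neg hc1]
    by_cases hge : m1 ≥ m2
    · rw [if_pos hge, memLeakAltGo]
      simp only [dif_neg (show ¬ (1 : Int) ≤ m1 by omega)]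
      simp
    · rw [if_neg hge, memLeakAltGo]
      simp only [dif_neg (show ¬ (1 : Int) ≤ m2 by omega)]
      simp
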